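-- pv_equiv track=rewrite | github.com/astonm/advent-of-code-2019 | day16/code.py | wrap_sum
-- ===== SOURCE A (Python) =====
-- def wrap_sum(o_start, o_end, data):
--     if o_start >= o_end:
--         return 0
--     start = o_start % len(data)
--     end = o_end % len(data)
--     s = 0
--     p = start
--     while p != end:
--         s += data[p]
--         p = (p + 1) % len(data)
--
--     n_full = (o_end - o_start) // len(data)
--     s += sum(data) * n_full
--     return s
-- ===== SOURCE B (Python) =====
-- def wrap_sum(o_start, o_end, data):
--     if o_start >= o_end:
--         return 0
--     n = len(data)
--     prefix = [0]
--     total = 0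
--     for x in data:
--         total += x
--         prefix.append(total)
--     span = o_end - o_start
--     start = o_start % n
--     rem = span % n
--     s = total * (span // n)
--     if start + rem <= n:
--         return s + prefix[start + rem] - prefix[start]
--     return s + (total - prefix[start]) + prefix[start + rem - n]
-- ===== Notes on version B (the rewrite author's own statement) =====
-- stated objective: alternative
-- what changed: Replaced the element-by-element wrapping while-loop with a prefix-sum table plus index arithmetic: the wrapped partial segment is read off as one or two prefix-sum differences.
import Mathlib
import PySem

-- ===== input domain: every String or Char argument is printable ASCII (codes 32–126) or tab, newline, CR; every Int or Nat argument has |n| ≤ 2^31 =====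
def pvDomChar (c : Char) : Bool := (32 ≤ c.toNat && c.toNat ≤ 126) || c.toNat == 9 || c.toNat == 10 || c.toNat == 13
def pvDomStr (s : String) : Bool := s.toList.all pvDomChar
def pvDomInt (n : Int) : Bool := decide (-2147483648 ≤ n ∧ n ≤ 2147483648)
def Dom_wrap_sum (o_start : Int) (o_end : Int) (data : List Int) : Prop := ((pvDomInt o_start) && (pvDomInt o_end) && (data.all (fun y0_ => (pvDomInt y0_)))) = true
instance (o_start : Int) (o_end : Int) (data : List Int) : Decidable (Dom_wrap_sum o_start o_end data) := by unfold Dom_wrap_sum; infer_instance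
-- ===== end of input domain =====

-- B replaces A's element-by-element wrapping while-loop by a prefix-sum table read off with
-- index arithmetic (alternative decomposition, same O(n) cost). Both raise on empty data with
-- o_start < o_end; Pre_ excludes exactly those inputs.

-- ===== PORT A =====
-- the 'while p != end' loop; fuel = len(data) bounds the ≤ len(data)-1 iterations Python performs
def wrapLoopA (data : List Int) (endp : Int) (fuel : Nat) (p : Int) (s : Int) : Int :=
  match fuel with
  | 0 => s
  | f + 1 =>
    if p = endp then s
    else wrapLoopA data endp f (PySem.Int.mod (p + 1) data.length) (s + PySem.List.pyGetD data p 0)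

def wrap_sum (o_start : Int) (o_end : Int) (data : List Int) : Int :=
  if o_start ≥ o_end then 0
  else
    let start := PySem.Int.mod o_start data.length
    let endp := PySem.Int.mod o_end data.length
    let s := wrapLoopA data endp data.length start 0
    let n_full := PySem.Int.floordiv (o_end - o_start) data.length
    s + data.sum * n_full

-- ===== PORT B =====
def wrap_sum_alt (o_start : Int) (o_end : Int) (data : List Int) : Int :=
  if o_start ≥ o_end then 0
  else
    let n : Int := data.length
    let pt := data.foldl (fun (st : List Int × Int) x => (st.1 ++ [st.2 + x], st.2 + x)) ([0], 0)
    let pfx := pt.1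
    let total := pt.2
    let span := o_end - o_start
    let start := PySem.Int.mod o_start n
    let rem := PySem.Int.mod span n
    let s := total * PySem.Int.floordiv span n
    if start + rem ≤ n then
      s + PySem.List.pyGetD pfx (start + rem) 0 - PySem.List.pyGetD pfx start 0
    else
      s + (total - PySem.List.pyGetD pfx start 0) + PySem.List.pyGetD pfx (start + rem - n) 0

-- ===== PRECONDITION & SPEC =====
-- Pre_ excludes only the inputs where Python A raises ZeroDivisionError (empty data reached past the guard)
def Pre_wrap_sum (o_start : Int) (o_end : Int) (data : List Int) : Prop :=
  o_start ≥ o_end ∨ data ≠ []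
instance (o_start : Int) (o_end : Int) (data : List Int) : Decidable (Pre_wrap_sum o_start o_end data) := by
  unfold Pre_wrap_sum; infer_instance

def pvWitness_wrap_sum : Int × Int × List Int := (0, 3, [1, 2, 3])

def Spec_wrap_sum (o_start : Int) (o_end : Int) (data : List Int) (out : Int) : Prop := out = wrap_sum_alt o_start o_end data
instance (o_start : Int) (o_end : Int) (data : List Int) (out : Int) : Decidable (Spec_wrap_sum o_start o_end data out) := by unfold Spec_wrap_sum; infer_instance

-- ===== CLAIM (what is proved, stated in full; the proofs are below) =====
def Claim_equal_wrap_sum : Prop := ∀ (o_start : Int) (o_end : Int) (data : List Int), Dom_wrap_sum o_start o_end data → Pre_wrap_sum o_start o_end data → Spec_wrap_sum o_start o_end data (wrap_sum o_start o_end data)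

-- ===== LEMMAS AND PROOFS =====

-- the sum of the r wrapped elements starting at index s0 (shape of A's loop body)
def wseg (data : List Int) (s0 : Nat) (r : Nat) : Int :=
  match r with
  | 0 => 0
  | r + 1 => data.getD s0 0 + wseg data ((s0 + 1) % data.length) r

-- the list of running partial sums starting from t (shape of B's fold)
def prefAux (t : Int) (l : List Int) : List Int :=
  match l with
  | [] => []
  | x :: xs => (t + x) :: prefAux (t + x) xs

theorem foldl_prefAux (l : List Int) : ∀ (pr : List Int) (t : Int),
    l.foldl (fun (st : List Int × Int) x => (st.1 ++ [st.2 + x], st.2 + x)) (pr, t)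
      = (pr ++ prefAux t l, t + l.sum) := by
  induction l with
  | nil => intro pr t; simp [prefAux]
  | cons x xs ih =>
    intro pr t
    simp only [List.foldl_cons, ih, prefAux, List.sum_cons, Prod.mk.injEq]
    exact ⟨by simp, by ring⟩

theorem length_prefAux (t : Int) (l : List Int) : (prefAux t l).length = l.length := by
  induction l generalizing t with
  | nil => rfl
  | cons x xs ih => simp [prefAux, ih]

theorem getD_prefAux (l : List Int) : ∀ (t : Int) (i : Nat), i < l.length →
    (prefAux t l).getD i 0 = t + (l.take (i + 1)).sum := by
  induction l with
  | nil => intro t i h; simp at h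
  | cons x xs ih =>
    intro t i h
    cases i with
    | zero => simp [prefAux]
    | succ j =>
      simp only [prefAux, List.getD_cons_succ, List.take_succ_cons, List.sum_cons]
      rw [ih (t + x) j (by simpa using h)]
      ring

theorem getD_prefixList (l : List Int) (i : Nat) (h : i ≤ l.length) :
    (0 :: prefAux 0 l).getD i 0 = (l.take i).sum := by
  cases i with
  | zero => simp
  | succ j =>
    simp only [List.getD_cons_succ]
    rw [getD_prefAux l 0 j (by omega)]
    simp

theorem wseg_eq_rot (data : List Int) : ∀ (r s0 : Nat), s0 < data.length → r ≤ data.length →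
    wseg data s0 r = ((data.drop s0 ++ data.take s0).take r).sum := by
  intro r
  induction r with
  | zero => intro s0 _ _; simp [wseg]
  | succ r ih =>
    intro s0 hs hr
    rw [wseg]
    have hdrop : data.drop s0 = data[s0] :: data.drop (s0 + 1) := List.drop_eq_getElem_cons hs
    rw [hdrop]
    simp only [List.cons_append, List.take_succ_cons, List.sum_cons]
    have hget : data.getD s0 0 = data[s0] := List.getD_eq_getElem data 0 hs
    rw [hget]
    by_cases h : s0 + 1 < data.length
    · have hmod : (s0 + 1) % data.length = s0 + 1 := Nat.mod_eq_of_lt h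
      rw [hmod, ih (s0 + 1) h (by omega)]
      have htake : data.take (s0 + 1) = data.take s0 ++ [data[s0]] := by
        rw [List.take_add_one]
        simp [List.getElem?_eq_getElem hs]
      rw [htake, ← List.append_assoc, List.take_append]
      have hlen : r - (data.drop (s0 + 1) ++ data.take s0).length = 0 := by
        simp [List.length_drop, List.length_take]; omega
      rw [hlen]
      simp
    · have hs1 : s0 + 1 = data.length := by omega
      have hmod : (s0 + 1) % data.length = 0 := by rw [hs1]; exact Nat.mod_self _
      rw [hmod, ih 0 (by omega) (by omega)]
      simp only [List.drop_zero, List.take_zero, List.append_nil]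
      have : data.drop (s0 + 1) = [] := by rw [hs1]; simp
      rw [this, List.nil_append, List.take_take]
      have hmin : min r s0 = r := by omega
      rw [hmin]

theorem emod_eq_zero_iff_eq (n a b : Int) (h0a : 0 ≤ a) (han : a < n) (h0b : 0 ≤ b)
    (hbn : b < n) : (a - b) % n = 0 ↔ a = b := by
  constructor
  · intro h
    have hdvd : n ∣ (a - b) := Int.dvd_of_emod_eq_zero h
    have := Int.eq_zero_of_abs_lt_dvd hdvd (by rw [abs_lt]; omega)
    omega
  · intro h; simp [h]

theorem emod_sub_one (n m x : Int) (hn : 0 < n) (hm : x % n = m) (h1 : 1 ≤ m) :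
    (x - 1) % n = m - 1 := by
  have hmn : m < n := hm ▸ Int.emod_lt_of_pos x hn
  have h2 : (x - 1) % n = (x % n - 1 % n) % n := Int.sub_emod x 1 n
  have h3 : (1 : Int) % n = 1 := Int.emod_eq_of_lt (by omega) (by omega)
  rw [h2, h3, hm, Int.emod_eq_of_lt (by omega) (by omega)]

theorem wrapLoopA_eq (data : List Int) (endp : Int) : ∀ (fuel : Nat) (p s : Int),
    0 ≤ p → p < data.length → 0 ≤ endp → endp < data.length →
    ((endp - p) % data.length).toNat ≤ fuel →
    wrapLoopA data endp fuel p s = s + wseg data p.toNat ((endp - p) % data.length).toNat := by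
  intro fuel
  induction fuel with
  | zero =>
    intro p s hp0 hpn he0 hen hf
    have hn : (0:Int) < data.length := by omega
    have h0 : (0:Int) ≤ (endp - p) % data.length := Int.emod_nonneg _ (by omega)
    have hz : (endp - p) % data.length = 0 := by omega
    rw [wrapLoopA, hz]
    simp [wseg]
  | succ f ih =>
    intro p s hp0 hpn he0 hen hf
    have hn : (0:Int) < data.length := by omega
    rw [wrapLoopA]
    by_cases hpe : p = endp
    · have hz : (endp - p) % data.length = 0 := by
        rw [emod_eq_zero_iff_eq data.length endp p he0 hen hp0 hpn]; omega
      rw [if_pos hpe, hz]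
      simp [wseg]
    · rw [if_neg hpe]
      set m := (endp - p) % data.length with hmdef
      have h0 : (0:Int) ≤ m := Int.emod_nonneg _ (by omega)
      have hmn : m < data.length := Int.emod_lt_of_pos _ hn
      have hm1 : 1 ≤ m := by
        have hne : m ≠ 0 := by
          intro hz
          apply hpe
          rw [hmdef, emod_eq_zero_iff_eq data.length endp p he0 hen hp0 hpn] at hz
          omega
        omega
      have hmodeq : PySem.Int.mod (p + 1) (data.length : Int) = (p + 1) % data.length :=
        PySem.Int.mod_eq_emod_of_pos hn
      set p' := (p + 1) % (data.length : Int) with hp'def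
      have hp'0 : 0 ≤ p' := Int.emod_nonneg _ (by omega)
      have hp'n : p' < data.length := Int.emod_lt_of_pos _ hn
      have hstep : (endp - p') % data.length = m - 1 := by
        have h1 : (endp - p') % (data.length : Int) = (endp - (p + 1)) % (data.length : Int) := by
          conv_lhs => rw [Int.sub_emod]
          conv_rhs => rw [Int.sub_emod]
          rw [hp'def, Int.emod_emod_of_dvd _ (dvd_refl _)]
        rw [h1]
        have : endp - (p + 1) = (endp - p) - 1 := by ring
        rw [this]
        exact emod_sub_one _ _ _ hn rfl hm1
      have hrec := ih p' (s + PySem.List.pyGetD data p 0) hp'0 hp'n he0 hen (by omega)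
      rw [hmodeq, hrec, hstep]
      have hr : m.toNat = (m - 1).toNat + 1 := by omega
      rw [hr, wseg]
      have hidx : p'.toNat = (p.toNat + 1) % data.length := by
        by_cases hc : p + 1 < data.length
        · have : p' = p + 1 := Int.emod_eq_of_lt (by omega) hc
          rw [this]
          have : (p.toNat + 1) % data.length = p.toNat + 1 := Nat.mod_eq_of_lt (by omega)
          omega
        · have hpl : p + 1 = data.length := by omega
          have : p' = 0 := by rw [hp'def, hpl]; simp
          rw [this]
          have : (p.toNat + 1) % data.length = 0 := by
            have : p.toNat + 1 = data.length := by omega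
            rw [this, Nat.mod_self]
          omega
      have hget : PySem.List.pyGetD data p 0 = data.getD p.toNat 0 := by
        rw [PySem.List.pyGetD_eq_getElem data 0 hp0 hpn, List.getD_eq_getElem data 0 (by omega)]
      rw [hidx, hget]
      ring

-- ===== VERDICT (by name: the statement is the Claim_ definition above) =====
theorem wrap_sum_spec : Claim_equal_wrap_sum := by
  unfold Claim_equal_wrap_sum
  intro o_start o_end data _ hpre
  unfold Spec_wrap_sum wrap_sum wrap_sum_alt
  by_cases hge : o_start ≥ o_end
  · simp [hge]
  · have hne : data ≠ [] := hpre.resolve_left hge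
    have hn : (0:Int) < (data.length : Int) := by
      have := List.length_pos_of_ne_nil hne
      omega
    simp only [if_neg hge]
    rw [PySem.Int.mod_eq_emod_of_pos hn, PySem.Int.mod_eq_emod_of_pos hn,
        PySem.Int.mod_eq_emod_of_pos hn]
    rw [foldl_prefAux data [0] 0]
    set n : Int := (data.length : Int) with hndef
    set st := o_start % n with hst
    set en := o_end % n with hen
    set rem := (o_end - o_start) % n with hrem
    have hst0 : 0 ≤ st := Int.emod_nonneg _ (by omega)
    have hstn : st < n := Int.emod_lt_of_pos _ hn
    have hen0 : 0 ≤ en := Int.emod_nonneg _ (by omega)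
    have henn : en < n := Int.emod_lt_of_pos _ hn
    have hrem0 : 0 ≤ rem := Int.emod_nonneg _ (by omega)
    have hremn : rem < n := Int.emod_lt_of_pos _ hn
    have hes : (en - st) % n = rem := by
      rw [hrem, Int.sub_emod o_end o_start n]
    have hloop := wrapLoopA_eq data en data.length st 0 hst0 hstn hen0 henn
      (by rw [hes]; omega)
    rw [hes] at hloop
    simp only [List.singleton_append, zero_add] at hloop ⊢
    have hplen : (0 :: prefAux 0 data).length = data.length + 1 := by
      simp [length_prefAux]
    have hP : ∀ i : Int, 0 ≤ i → i ≤ n → PySem.List.pyGetD (0 :: prefAux 0 data) i 0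
        = (data.take i.toNat).sum := by
      intro i h0 h1
      rw [PySem.List.pyGetD_eq_getElem (0 :: prefAux 0 data) 0 h0 (by rw [hplen]; omega)]
      rw [← List.getD_eq_getElem (0 :: prefAux 0 data) 0 (by rw [hplen]; omega)]
      exact getD_prefixList data i.toNat (by omega)
    set s0 := st.toNat with hs0
    set r := rem.toNat with hr
    have hs0n : s0 < data.length := by omega
    have hrn : r ≤ data.length := by omega
    rw [hloop, wseg_eq_rot data r s0 hs0n hrn]
    have hdlen : (data.drop s0).length = data.length - s0 := by simp
    by_cases hcase : st + rem ≤ n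
    · rw [if_pos hcase]
      rw [hP st hst0 (by omega), hP (st + rem) (by omega) (by omega)]
      have hidx : (st + rem).toNat = s0 + r := by omega
      rw [hidx]
      have htk : ((data.drop s0 ++ data.take s0).take r) = (data.drop s0).take r := by
        rw [List.take_append]
        have : r - (data.drop s0).length = 0 := by omega
        rw [this]
        simp
      rw [htk]
      have hsplit : (data.take (s0 + r)).sum
          = (data.take s0).sum + ((data.drop s0).take r).sum := by
        rw [List.take_add, List.sum_append]
      linarith
    · rw [if_neg hcase]
      rw [hP st hst0 (by omega), hP (st + rem - n) (by omega) (by omega)]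
      have hstI : st = (s0 : Int) := by omega
      have hremI : rem = (r : Int) := by omega
      have hidx : (st + rem - n).toNat = s0 + r - data.length := by
        rw [hstI, hremI, hndef]; omega
      rw [hidx]
      have htk : ((data.drop s0 ++ data.take s0).take r)
          = data.drop s0 ++ data.take (s0 + r - data.length) := by
        rw [List.take_append]
        have h2 : data.length < s0 + r := by
          have h3 := hcase
          rw [hstI, hremI, hndef] at h3
          omega
        rw [List.take_of_length_le (by omega)]
        have h4 : r - (data.drop s0).length = s0 + r - data.length := by
          rw [hdlen]; omega
        rw [h4, List.take_take]
        have h5 : min (s0 + r - data.length) s0 = s0 + r - data.length := by omega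
        rw [h5]
      rw [htk, List.sum_append]
      have htd : (data.take s0).sum + (data.drop s0).sum = data.sum := by
        rw [← List.sum_append, List.take_append_drop]
      linarith
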